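-- pv_equiv track=rewrite | github.com/BillG80/gy9163-AHRS | tools/fontcvt.py | enhance_0_character
-- ===== SOURCE A (Python) =====
-- def enhance_0_character(mask_data, width, height):
--     """Special enhancement for the '0' (zero) character to improve its appearance."""
--     # Convert to 2D array for easier processing
--     mask_2d = [[0 for x in range(width)] for y in range(height)]
--     for y in range(height):
--         for x in range(width):
--             mask_2d[y][x] = mask_data[y * width + x]
--
--     # Find the bounds of the character
--     left_x = width
--     right_x = -1
--     top_y = height
--     bottom_y = -1
--
--     for y in range(height):
--         for x in range(width):
--             if mask_2d[y][x] == 1: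
--                 left_x = min(left_x, x)
--                 right_x = max(right_x, x)
--                 top_y = min(top_y, y)
--                 bottom_y = max(bottom_y, y)
--
--     # If we couldn't find any pixels, return the original data
--     if left_x > right_x or top_y > bottom_y:
--         return mask_data
--
--     # 1. Clear the existing character
--     for y in range(height):
--         for x in range(width):
--             mask_2d[y][x] = 0
--
--     # 2. Calculate the center and dimensions of the oval
--     center_x = (left_x + right_x) // 2
--     center_y = (top_y + bottom_y) // 2
--     char_width = min(6, right_x - left_x + 1)
--     char_height = bottom_y - top_y + 1
--
--     # 3. Create a simple oval shape with equal thickness on both sides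
--     # Left and right sides
--     for y in range(top_y + 1, bottom_y):
--         # Left side
--         mask_2d[y][left_x] = 1
--
--         # Right side
--         mask_2d[y][right_x] = 1
--
--     # Top and bottom curves
--     for x in range(left_x + 1, right_x):
--         # Top curve
--         mask_2d[top_y][x] = 1
--
--         # Bottom curve
--         mask_2d[bottom_y][x] = 1
--
--     # 4. Round the corners to make it look more like a '0'
--     # Top-left corner
--     if top_y + 1 < height and left_x + 1 < width:
--         mask_2d[top_y + 1][left_x + 1] = 1
--         mask_2d[top_y][left_x] = 0
--
--     # Top-right corner
--     if top_y + 1 < height and right_x - 1 >= 0: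
--         mask_2d[top_y + 1][right_x - 1] = 1
--         mask_2d[top_y][right_x] = 0
--
--     # Bottom-left corner
--     if bottom_y - 1 >= 0 and left_x + 1 < width:
--         mask_2d[bottom_y - 1][left_x + 1] = 1
--         mask_2d[bottom_y][left_x] = 0
--
--     # Bottom-right corner
--     if bottom_y - 1 >= 0 and right_x - 1 >= 0:
--         mask_2d[bottom_y - 1][right_x - 1] = 1
--         mask_2d[bottom_y][right_x] = 0
--
--     # Convert back to 1D array
--     final_data = []
--     for y in range(height):
--         for x in range(width):
--             final_data.append(mask_2d[y][x])
--
--     return final_data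
-- ===== SOURCE B (Python) =====
-- def enhance_0_character(mask_data, width, height):
--     """Oval '0' redraw, rebuilt per-pixel: one flat scan finds the bounding box
--     (first/last lit index give top/bottom rows), then each output pixel is
--     computed directly by a last-write-wins rule -- no 2D array, no mutation."""
--     if width <= 0 or height <= 0:
--         return mask_data
--     n = width * height
--     lit = [i for i in range(n) if mask_data[i] == 1]
--     if not lit:
--         return mask_data
--
--     top = lit[0] // width
--     bottom = lit[-1] // width
--     cols = [i % width for i in lit]
--     left = min(cols)
--     right = max(cols)
--
--     g_tl = top + 1 < height and left + 1 < width
--     g_tr = top + 1 < height and right - 1 >= 0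
--     g_bl = bottom - 1 >= 0 and left + 1 < width
--     g_br = bottom - 1 >= 0 and right - 1 >= 0
--
--     def pix(y, x):
--         if g_br and y == bottom and x == right:
--             return 0
--         if g_br and y == bottom - 1 and x == right - 1:
--             return 1
--         if g_bl and y == bottom and x == left:
--             return 0
--         if g_bl and y == bottom - 1 and x == left + 1:
--             return 1
--         if g_tr and y == top and x == right:
--             return 0
--         if g_tr and y == top + 1 and x == right - 1:
--             return 1
--         if g_tl and y == top and x == left:
--             return 0
--         if g_tl and y == top + 1 and x == left + 1:
--             return 1
--         if (y == top or y == bottom) and left < x < right: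
--             return 1
--         if (x == left or x == right) and top < y < bottom:
--             return 1
--         return 0
--
--     return [pix(i // width, i % width) for i in range(n)]
-- ===== Notes on version B (the rewrite author's own statement) =====
-- stated objective: alternative
-- what changed: B drops the 2D array and all mutation passes: one flat scan collects the lit indices (first/last give the top/bottom rows, min/max of i%width the columns) and the output is rebuilt per pixel by a closed last-write-wins rule instead of clear/draw/fix-up passes over a mutable grid.
-- intended difference: When width and height are both negative A's sentinel bounds test misfires, it falls through and returns [], discarding mask_data; B returns mask_data unchanged, the 'nothing to draw' result A itself uses on every other pixel-free input. — e.g. on enhance_0_character([0], -1, -1): A returns [], B returns [0]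
import Mathlib
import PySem

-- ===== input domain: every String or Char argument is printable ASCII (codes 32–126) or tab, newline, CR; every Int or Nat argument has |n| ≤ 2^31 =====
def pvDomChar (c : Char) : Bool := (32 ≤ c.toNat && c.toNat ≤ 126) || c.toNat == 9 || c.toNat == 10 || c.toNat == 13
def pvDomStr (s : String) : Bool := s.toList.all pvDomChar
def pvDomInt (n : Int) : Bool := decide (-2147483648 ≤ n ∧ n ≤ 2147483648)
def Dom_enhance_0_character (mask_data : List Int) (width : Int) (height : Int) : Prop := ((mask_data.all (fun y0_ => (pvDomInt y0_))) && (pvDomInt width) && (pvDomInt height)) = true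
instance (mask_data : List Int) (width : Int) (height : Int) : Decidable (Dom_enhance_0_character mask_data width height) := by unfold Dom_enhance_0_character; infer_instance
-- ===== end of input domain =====

-- B redraws the '0' with a flat bounding-box scan and a per-pixel last-write-wins rule (no 2D array,
-- no clear/mutate passes); objective: alternative (same asymptotic cost, different decomposition).

-- ===== PORT A =====
-- mask_2d[y][x] = v / mask_2d[y][x]; exact for the non-negative in-range indices at which A evaluates them (guaranteed under Pre_)
def pvSet2 (m : List (List Int)) (y x : Int) (v : Int) : List (List Int) :=
  m.set y.toNat ((m.getD y.toNat []).set x.toNat v)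

def pvGet2 (m : List (List Int)) (y x : Int) : Int :=
  (m.getD y.toNat []).getD x.toNat 0

-- [[0 for x in range(width)] for y in range(height)]
def a_mask0 (width height : Int) : List (List Int) :=
  (PySem.List.pyRange 0 height 1).map (fun _y => (PySem.List.pyRange 0 width 1).map (fun _x => (0:Int)))

-- the fill loop: mask_2d[y][x] = mask_data[y*width+x]  (pyGetD is exact here: Pre_ puts the index in range)
def a_fill (mask_data : List Int) (width height : Int) : List (List Int) :=
  (PySem.List.pyRange 0 height 1).foldl (fun m y =>
    (PySem.List.pyRange 0 width 1).foldl (fun m x =>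
      pvSet2 m y x (PySem.List.pyGetD mask_data (y * width + x) 0)) m) (a_mask0 width height)

-- the bounds loop over (left_x, right_x, top_y, bottom_y)
def a_bounds (m2d : List (List Int)) (width height : Int) : Int × Int × Int × Int :=
  (PySem.List.pyRange 0 height 1).foldl (fun b y =>
    (PySem.List.pyRange 0 width 1).foldl (fun b x =>
      if pvGet2 m2d y x = 1 then (min b.1 x, max b.2.1 x, min b.2.2.1 y, max b.2.2.2 y) else b) b)
    (width, -1, height, -1)

-- 1. clear the existing character
def a_clear (m2d : List (List Int)) (width height : Int) : List (List Int) :=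
  (PySem.List.pyRange 0 height 1).foldl (fun m y =>
    (PySem.List.pyRange 0 width 1).foldl (fun m x => pvSet2 m y x 0) m) m2d

-- 3a. left and right sides
def a_sides (m : List (List Int)) (top_y bottom_y left_x right_x : Int) : List (List Int) :=
  (PySem.List.pyRange (top_y + 1) bottom_y 1).foldl
    (fun m y => pvSet2 (pvSet2 m y left_x 1) y right_x 1) m

-- 3b. top and bottom curves
def a_curves (m : List (List Int)) (top_y bottom_y left_x right_x : Int) : List (List Int) :=
  (PySem.List.pyRange (left_x + 1) right_x 1).foldl
    (fun m x => pvSet2 (pvSet2 m top_y x 1) bottom_y x 1) m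

-- 4. round the corners (four guarded fix-ups, in A's order)
def a_corners (m : List (List Int)) (top_y bottom_y left_x right_x width height : Int) : List (List Int) :=
  let m4 := if top_y + 1 < height ∧ left_x + 1 < width then
      pvSet2 (pvSet2 m (top_y + 1) (left_x + 1) 1) top_y left_x 0 else m
  let m5 := if top_y + 1 < height ∧ right_x - 1 ≥ 0 then
      pvSet2 (pvSet2 m4 (top_y + 1) (right_x - 1) 1) top_y right_x 0 else m4
  let m6 := if bottom_y - 1 ≥ 0 ∧ left_x + 1 < width then
      pvSet2 (pvSet2 m5 (bottom_y - 1) (left_x + 1) 1) bottom_y left_x 0 else m5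
  if bottom_y - 1 ≥ 0 ∧ right_x - 1 ≥ 0 then
      pvSet2 (pvSet2 m6 (bottom_y - 1) (right_x - 1) 1) bottom_y right_x 0 else m6

-- convert back to 1D array
def a_flatten (m : List (List Int)) (width height : Int) : List Int :=
  (PySem.List.pyRange 0 height 1).foldl (fun acc y =>
    (PySem.List.pyRange 0 width 1).foldl (fun acc x => acc ++ [pvGet2 m y x]) acc) []

def enhance_0_character (mask_data : List Int) (width : Int) (height : Int) : List Int :=
  let mask2d := a_fill mask_data width height
  let b := a_bounds mask2d width height
  let left_x := b.1
  let right_x := b.2.1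
  let top_y := b.2.2.1
  let bottom_y := b.2.2.2
  if left_x > right_x ∨ top_y > bottom_y then mask_data
  else
    let m1 := a_clear mask2d width height
    let _center_x := PySem.Int.floordiv (left_x + right_x) 2
    let _center_y := PySem.Int.floordiv (top_y + bottom_y) 2
    let _char_width := min 6 (right_x - left_x + 1)
    let _char_height := bottom_y - top_y + 1
    let m2 := a_sides m1 top_y bottom_y left_x right_x
    let m3 := a_curves m2 top_y bottom_y left_x right_x
    let m4 := a_corners m3 top_y bottom_y left_x right_x width height
    a_flatten m4 width height

-- ===== PORT B =====
-- the last-write-wins per-pixel rule of Source B's pix(y, x)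
def b_pix (top bottom left right width height y x : Int) : Int :=
  if (bottom - 1 ≥ 0 ∧ right - 1 ≥ 0) ∧ y = bottom ∧ x = right then 0
  else if (bottom - 1 ≥ 0 ∧ right - 1 ≥ 0) ∧ y = bottom - 1 ∧ x = right - 1 then 1
  else if (bottom - 1 ≥ 0 ∧ left + 1 < width) ∧ y = bottom ∧ x = left then 0
  else if (bottom - 1 ≥ 0 ∧ left + 1 < width) ∧ y = bottom - 1 ∧ x = left + 1 then 1
  else if (top + 1 < height ∧ right - 1 ≥ 0) ∧ y = top ∧ x = right then 0
  else if (top + 1 < height ∧ right - 1 ≥ 0) ∧ y = top + 1 ∧ x = right - 1 then 1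
  else if (top + 1 < height ∧ left + 1 < width) ∧ y = top ∧ x = left then 0
  else if (top + 1 < height ∧ left + 1 < width) ∧ y = top + 1 ∧ x = left + 1 then 1
  else if (y = top ∨ y = bottom) ∧ (left < x ∧ x < right) then 1
  else if (x = left ∨ x = right) ∧ (top < y ∧ y < bottom) then 1
  else 0

def enhance_0_character_alt (mask_data : List Int) (width : Int) (height : Int) : List Int :=
  if width ≤ 0 ∨ height ≤ 0 then mask_data
  else
    let n := width * height
    -- mask_data[i] via pyGetD: exact under Pre_ (0 ≤ i < width*height ≤ len)
    let lit := (PySem.List.pyRange 0 n 1).filter (fun i => PySem.List.pyGetD mask_data i 0 == 1)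
    if lit.isEmpty then mask_data
    else
      let top := PySem.Int.floordiv (PySem.List.pyGetD lit 0 0) width
      let bottom := PySem.Int.floordiv (PySem.List.pyGetD lit (-1) 0) width
      let cols := lit.map (fun i => PySem.Int.mod i width)
      let left := (PySem.List.min? cols (fun v => v)).getD 0
      let right := (PySem.List.max? cols (fun v => v)).getD 0
      (PySem.List.pyRange 0 n 1).map (fun i =>
        b_pix top bottom left right width height
          (PySem.Int.floordiv i width) (PySem.Int.mod i width))

-- ===== PRECONDITION & SPEC =====
-- Pre_ excludes exactly the inputs where A raises IndexError: positive dimensions with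
-- mask_data shorter than width*height, and width,height both ≤ -3-ish (both negative with
-- one of them ≤ -3), where A indexes the empty mask_2d.
def Pre_enhance_0_character (mask_data : List Int) (width : Int) (height : Int) : Prop :=
  (0 < width ∧ 0 < height → width * height ≤ (mask_data.length : Int)) ∧
  (width < 0 ∧ height < 0 → -2 ≤ width ∧ -2 ≤ height)
instance (mask_data : List Int) (width : Int) (height : Int) : Decidable (Pre_enhance_0_character mask_data width height) := by unfold Pre_enhance_0_character; infer_instance
def pvWitness_enhance_0_character : List Int × Int × Int := ([1], 1, 1)

-- When width and height are both negative (and ≥ -2, else A raises), A's sentinel bounds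
-- comparison misfires and it falls through, returning [] and silently discarding mask_data;
-- B returns mask_data unchanged, the intended "nothing to draw" behaviour A itself uses
-- everywhere else.
def D_enhance_0_character (mask_data : List Int) (width : Int) (height : Int) : Prop :=
  mask_data ≠ [] ∧ width < 0 ∧ height < 0
instance (mask_data : List Int) (width : Int) (height : Int) : Decidable (D_enhance_0_character mask_data width height) := by unfold D_enhance_0_character; infer_instance

def Spec_enhance_0_character (mask_data : List Int) (width : Int) (height : Int) (out : List Int) : Prop := ¬ D_enhance_0_character mask_data width height → out = enhance_0_character_alt mask_data width height
instance (mask_data : List Int) (width : Int) (height : Int) (out : List Int) : Decidable (Spec_enhance_0_character mask_data width height out) := by unfold Spec_enhance_0_character; infer_instance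

def pvDiffWitness_enhance_0_character : List Int × Int × Int := ([0], -1, -1)
def pvDiffWitnessOut_enhance_0_character : (List Int) × (List Int) := ([], [0])

-- ===== CLAIM (what is proved, stated in full; the proofs are below) =====
def Claim_unchanged_enhance_0_character : Prop := ∀ (mask_data : List Int) (width : Int) (height : Int), Dom_enhance_0_character mask_data width height → Pre_enhance_0_character mask_data width height → Spec_enhance_0_character mask_data width height (enhance_0_character mask_data width height)
def Claim_changed_enhance_0_character : Prop := Dom_enhance_0_character (pvDiffWitness_enhance_0_character.1) (pvDiffWitness_enhance_0_character.2.1) (pvDiffWitness_enhance_0_character.2.2) ∧ Pre_enhance_0_character (pvDiffWitness_enhance_0_character.1) (pvDiffWitness_enhance_0_character.2.1) (pvDiffWitness_enhance_0_character.2.2) ∧ D_enhance_0_character (pvDiffWitness_enhance_0_character.1) (pvDiffWitness_enhance_0_character.2.1) (pvDiffWitness_enhance_0_character.2.2) ∧ enhance_0_character (pvDiffWitness_enhance_0_character.1) (pvDiffWitness_enhance_0_character.2.1) (pvDiffWitness_enhance_0_character.2.2) = pvDiffWitnessOut_enhance_0_character.1 ∧ enhance_0_character_alt (pvDiffWitness_enhance_0_character.1)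 (pvDiffWitness_enhance_0_character.2.1) (pvDiffWitness_enhance_0_character.2.2) = pvDiffWitnessOut_enhance_0_character.2 ∧ pvDiffWitnessOut_enhance_0_character.1 ≠ pvDiffWitnessOut_enhance_0_character.2
def Claim_exact_enhance_0_character : Prop := ∀ (mask_data : List Int) (width : Int) (height : Int), Dom_enhance_0_character mask_data width height → Pre_enhance_0_character mask_data width height → D_enhance_0_character mask_data width height → enhance_0_character mask_data width height ≠ enhance_0_character_alt mask_data width height

-- ===== LEMMAS AND PROOFS =====

-- A on a both-negative, ≥ -2 box returns [] whatever mask_data is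
theorem a_negneg (mask_data : List Int) (width height : Int)
    (hw : width < 0) (hw2 : -2 ≤ width) (hh : height < 0) (hh2 : -2 ≤ height) :
    enhance_0_character mask_data width height = [] := by
  have e1 : PySem.List.pyRange 0 height 1 = [] := PySem.List.pyRange_one_eq_nil (by omega)
  have e2 : PySem.List.pyRange (height + 1) (-1) 1 = [] := PySem.List.pyRange_one_eq_nil (by omega)
  have e3 : PySem.List.pyRange (width + 1) (-1) 1 = [] := PySem.List.pyRange_one_eq_nil (by omega)
  simp only [enhance_0_character, a_fill, a_bounds, a_clear, a_sides, a_curves, a_corners,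
    a_flatten, a_mask0, e1, e2, e3, List.foldl_nil, List.map_nil]
  rw [if_neg (by omega)]

-- basic list/grid lemmas --------------------------------------------------

theorem pv_foldl_const {α β : Type} (L : List α) (b : β) :
    L.foldl (fun b _ => b) b = b := by
  induction L generalizing b with
  | nil => rfl
  | cons a t ih => exact ih b

theorem pv_getD_set_lt {α : Type} (l : List α) (i : Nat) (a : α) (j : Nat) (d : α)
    (hi : i < l.length) :
    (l.set i a).getD j d = if i = j then a else l.getD j d := by
  simp [List.getD_eq_getElem?_getD, List.getElem?_set]
  split_ifs <;> simp_all

def pvShape (m : List (List Int)) (h w : Nat) : Prop :=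
  m.length = h ∧ ∀ r ∈ m, r.length = w

theorem pvShape_set2 {m : List (List Int)} {h w : Nat} (hm : pvShape m h w)
    {y x : Int} (hy : 0 ≤ y) (hyh : y < (h : Int)) (v : Int) :
    pvShape (pvSet2 m y x v) h w := by
  obtain ⟨h1, h2⟩ := hm
  refine ⟨by simpa [pvSet2] using h1, ?_⟩
  have hL : m.length = h := h1
  intro r hr
  rcases List.mem_or_eq_of_mem_set hr with hmem | heq
  · exact h2 _ hmem
  · subst heq
    rw [List.length_set]
    have hylt : y.toNat < m.length := by omega
    rw [List.getD_eq_getElem _ _ hylt]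
    exact h2 _ (List.getElem_mem hylt)

theorem pvGet2_set2 {m : List (List Int)} {h w : Nat} (hm : pvShape m h w)
    {y x y' x' : Int} (hy : 0 ≤ y) (hyh : y < (h : Int)) (hx : 0 ≤ x) (hxw : x < (w : Int))
    (hy' : 0 ≤ y') (hx' : 0 ≤ x') (v : Int) :
    pvGet2 (pvSet2 m y x v) y' x' = if y' = y ∧ x' = x then v else pvGet2 m y' x' := by
  have hL := hm.1
  have hylt : y.toNat < m.length := by omega
  unfold pvGet2 pvSet2
  rw [pv_getD_set_lt _ _ _ _ _ hylt]
  by_cases hyy : y.toNat = y'.toNat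
  · have hrow : (m.getD y.toNat []).length = w := by
      rw [List.getD_eq_getElem _ _ hylt]; exact hm.2 _ (List.getElem_mem hylt)
    have hxlt : x.toNat < (m.getD y.toNat []).length := by rw [hrow]; omega
    rw [if_pos hyy]
    rw [pv_getD_set_lt _ _ _ _ _ hxlt]
    by_cases hxx : x.toNat = x'.toNat
    · rw [if_pos hxx, if_pos ⟨by omega, by omega⟩]
    · rw [if_neg hxx, if_neg (by intro hc; apply hxx; omega), hyy]
  · rw [if_neg hyy, if_neg (by intro hc; apply hyy; omega)]

-- running min/max facts ---------------------------------------------------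

theorem pv_le_foldl_min (L : List Int) (c d : Int) (h1 : d ≤ c) (h2 : ∀ a ∈ L, d ≤ a) :
    d ≤ L.foldl min c := by
  induction L generalizing c with
  | nil => exact h1
  | cons a t ih =>
    exact ih _ (le_min h1 (h2 a (by simp))) (fun b hb => h2 b (by simp [hb]))

theorem pv_foldl_max_le (L : List Int) (c d : Int) (h1 : c ≤ d) (h2 : ∀ a ∈ L, a ≤ d) :
    L.foldl max c ≤ d := by
  induction L generalizing c with
  | nil => exact h1
  | cons a t ih =>
    exact ih _ (max_le h1 (h2 a (by simp))) (fun b hb => h2 b (by simp [hb]))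

theorem pv_foldl_min_eq (L : List Int) (c m : Int) (h1 : m ≤ c) (h2 : ∀ a ∈ L, m ≤ a)
    (h3 : m = c ∨ m ∈ L) : L.foldl min c = m := by
  refine le_antisymm ?_ (pv_le_foldl_min L c m h1 h2)
  rcases h3 with rfl | hmem
  · exact (PySem.List.foldl_min_le L m).1
  · exact (PySem.List.foldl_min_le L c).2 m hmem

theorem pv_foldl_max_eq (L : List Int) (c m : Int) (h1 : c ≤ m) (h2 : ∀ a ∈ L, a ≤ m)
    (h3 : m = c ∨ m ∈ L) : L.foldl max c = m := by
  refine le_antisymm (pv_foldl_max_le L c m h1 h2) ?_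
  rcases h3 with rfl | hmem
  · exact (PySem.List.le_foldl_max L m).1
  · exact (PySem.List.le_foldl_max L c).2 m hmem

theorem pv_pairwise_le_getLast (l : List Nat) (hl : l.Pairwise (· < ·)) (hne : l ≠ []) :
    ∀ a ∈ l, a ≤ l.getLast hne := by
  induction l with
  | nil => simp at hne
  | cons b t ih =>
    intro a ha
    rcases List.eq_nil_or_concat' t with rfl | ⟨t', z, rfl⟩
    · have : a = b := by simpa using ha
      simp [this]
    · have hlast : (b :: (t' ++ [z])).getLast hne = z := by
        simp [List.getLast_cons]
      rw [hlast]
      rcases List.mem_cons.1 ha with rfl | hat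
    
      · exact le_of_lt ((List.pairwise_cons.1 hl).1 z (by simp))
      · rcases List.mem_append.1 hat with hat' | hz
        · have ht := (List.pairwise_cons.1 hl).2
          have := List.pairwise_append.1 ht
          exact le_of_lt (this.2.2 a hat' z (by simp))
        · simp at hz; omega

-- row / grid fill lemmas --------------------------------------------------

theorem pv_rowfill (f : Nat → Int) (k : Nat) (r : List Int) :
    (((List.range k).foldl (fun r j => r.set j (f j)) r).length = r.length) ∧
    (∀ j d, ((List.range k).foldl (fun r j => r.set j (f j)) r).getD j d =
      if j < k ∧ j < r.length then f j else r.getD j d) := by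
  induction k with
  | zero => simp
  | succ k ih =>
    rw [List.range_succ, List.foldl_append]
    obtain ⟨ihl, ihv⟩ := ih
    simp only [List.foldl_cons, List.foldl_nil]
    constructor
    · rw [List.length_set, ihl]
    · intro j d
      by_cases hk : k < r.length
      · rw [pv_getD_set_lt _ _ _ _ _ (by rw [ihl]; exact hk), ihv]
        split_ifs <;> first | rfl | omega | simp_all
      · rw [List.set_eq_of_length_le (by rw [ihl]; omega), ihv]
        split_ifs <;> first | rfl | omega
  
theorem pv_rowfill_eq_map (f : Nat → Int) (w : Nat) (r : List Int) (hr : r.length = w) :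
    (List.range w).foldl (fun r j => r.set j (f j)) r = (List.range w).map f := by
  obtain ⟨hl, hv⟩ := pv_rowfill f w r
  apply List.ext_getElem (by simp [hl, hr])
  intro j h1 h2
  have hj : j < w := by simpa using h2
  have e1 : ((List.range w).foldl (fun r j => r.set j (f j)) r).getD j 0 = f j := by
    rw [hv, if_pos ⟨hj, by omega⟩]
  rw [List.getD_eq_getElem _ _ h1] at e1
  rw [e1]
  simp

theorem pv_inner_fold_row (g : Nat → Int) (L : List Nat) (m : List (List Int)) (y : Nat)
    (hy : y < m.length) :
    L.foldl (fun m x => m.set y ((m.getD y []).set x (g x))) m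
      = m.set y (L.foldl (fun r x => r.set x (g x)) (m.getD y [])) := by
  induction L generalizing m with
  | nil =>
    simp only [List.foldl_nil]
    rw [List.getD_eq_getElem _ _ hy]
    exact (List.set_getElem_self hy).symm
  | cons x t ih =>
    simp only [List.foldl_cons]
    rw [ih _ (by simpa using hy)]
    rw [pv_getD_set_lt _ _ _ _ _ hy, if_pos rfl, List.set_set]

theorem pv_gridfill (h w : Nat) (f : Nat → Nat → Int) (k : Nat) (m : List (List Int))
    (hk : k ≤ h) (hm : pvShape m h w) :
    (List.range k).foldl
        (fun m y => (List.range w).foldl (fun m x => m.set y ((m.getD y []).set x (f y x))) m) m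
      = (List.range k).map (fun y => (List.range w).map (f y)) ++ m.drop k := by
  induction k with
  | zero => simp
  | succ k ih =>
    have hml : m.length = h := hm.1
    have hk' : k < m.length := by omega
    obtain ⟨r, hr⟩ : ∃ r, m[k]'hk' = r := ⟨_, rfl⟩
    rw [List.range_succ, List.foldl_append]
    rw [ih (by omega)]
    set M := (List.range k).map (fun y => (List.range w).map (f y)) ++ m.drop k with hM
    have hlenmap : ((List.range k).map (fun y => (List.range w).map (f y))).length = k := by simp
    have hMlen : M.length = h := by
      rw [hM, List.length_append, hlenmap, List.length_drop, hml]; omega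
    have hrowk : M.getD k [] = r := by
      rw [hM, List.getD_eq_getElem _ _ (by rw [hMlen]; omega)]
      rw [List.getElem_append_right (by omega)]
      simp [hlenmap, hr]
    have hrlen : r.length = w := by
      rw [← hr]; exact hm.2 _ (List.getElem_mem hk')
    have hdrop : m.drop k = r :: m.drop (k+1) := by
      rw [← hr]; exact List.drop_eq_getElem_cons hk'
    simp only [List.foldl_cons, List.foldl_nil]
    rw [pv_inner_fold_row _ _ _ _ (by rw [hMlen]; omega)]
    rw [hrowk]
    rw [pv_rowfill_eq_map _ _ _ hrlen]
    rw [hM, hdrop]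
    set P := (List.range k).map (fun y => (List.range w).map (f y)) with hP
    rw [show k = P.length from hlenmap.symm]
    rw [List.set_append_right _ _ (le_refl _)]
    simp [hP]

-- row-major flattening of nested loops ------------------------------------

theorem pv_nested_eq_flat {S : Type} (w : Nat) (hw : 0 < w) (q : Nat → Prop)
    [DecidablePred q] (u : S → Nat → Nat → S) (h : Nat) (s : S) :
    (List.range h).foldl (fun s y =>
        (List.range w).foldl (fun s x => if q (y * w + x) then u s y x else s) s) s
      = (List.range (h * w)).foldl (fun s i => if q i then u s (i / w) (i % w) else s) s := by
  induction h generalizing s with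
  | zero => simp
  | succ h ih =>
    rw [List.range_succ, List.foldl_append, ih]
    rw [show (h + 1) * w = h * w + w by ring, List.range_add, List.foldl_append]
    simp only [List.foldl_cons, List.foldl_nil, List.foldl_map]
    apply PySem.List.foldl_congr_mem
    intro acc x hx
    have hxw : x < w := List.mem_range.1 hx
    have e1 : (h * w + x) / w = h := by
      rw [Nat.add_comm, Nat.add_mul_div_right _ _ hw, Nat.div_eq_of_lt hxw]; omega
    have e2 : (h * w + x) % w = x := by
      rw [Nat.add_comm, Nat.add_mul_mod_self_right, Nat.mod_eq_of_lt hxw]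
    rw [e1, e2]

theorem pv_flat_of_nested_map (w : Nat) (hw : 0 < w) (F : Nat → Nat → Int) (h : Nat) :
    (List.range (h * w)).map (fun k => F (k / w) (k % w))
      = (List.range h).flatMap (fun y => (List.range w).map (F y)) := by
  induction h with
  | zero => simp
  | succ h ih =>
    rw [show (h + 1) * w = h * w + w by ring, List.range_add, List.map_append, ih]
    rw [List.range_succ, List.flatMap_append]
    congr 1
    · rw [List.map_map]
      simp only [List.flatMap_cons, List.flatMap_nil, List.append_nil]
      apply List.map_congr_left
      intro x hx
      have hxw : x < w := List.mem_range.1 hx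
      have e1 : (h * w + x) / w = h := by
        rw [Nat.add_comm, Nat.add_mul_div_right _ _ hw, Nat.div_eq_of_lt hxw]; omega
      have e2 : (h * w + x) % w = x := by
        rw [Nat.add_comm, Nat.add_mul_mod_self_right, Nat.mod_eq_of_lt hxw]
      simp [Function.comp, e1, e2]

-- characterizing A's fill and clear loops ---------------------------------

theorem pv_cast_flat (md : List Int) (w y x : Nat) :
    PySem.List.pyGetD md ((y : Int) * (w : Int) + (x : Int)) 0 = md.getD (y * w + x) 0 := by
  rw [show ((y : Int) * (w : Int) + (x : Int)) = ((y * w + x : Nat) : Int) by push_cast; ring]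
  simp only [PySem.List.pyGetD_natCast]

theorem pv_grid_shape (h w : Nat) (f : Nat → Nat → Int) :
    pvShape ((List.range h).map (fun y => (List.range w).map (f y))) h w := by
  refine ⟨by simp, ?_⟩
  intro r hr
  obtain ⟨y, _, rfl⟩ := List.mem_map.1 hr
  simp

theorem pv_grid_get (h w : Nat) (f : Nat → Nat → Int) (y x : Nat) (hy : y < h) (hx : x < w) :
    pvGet2 ((List.range h).map (fun y => (List.range w).map (f y))) (y : Int) (x : Int) = f y x := by
  unfold pvGet2
  rw [Int.toNat_natCast, Int.toNat_natCast]
  have hrow : ((List.range h).map (fun y => (List.range w).map (f y))).getD y [] = (List.range w).map (f y) := by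
    rw [List.getD_eq_getElem _ _ (by simpa using hy)]
    rw [List.getElem_map, List.getElem_range]
  rw [hrow]
  rw [List.getD_eq_getElem _ _ (by simpa using hx)]
  rw [List.getElem_map, List.getElem_range]

theorem a_fill_eq (md : List Int) (w h : Nat) :
    a_fill md (w : Int) (h : Int)
      = (List.range h).map (fun y => (List.range w).map (fun x => md.getD (y * w + x) 0)) := by
  unfold a_fill a_mask0
  rw [PySem.List.pyRange_zero_nat h, PySem.List.pyRange_zero_nat w]
  simp only [List.foldl_map, List.map_map]
  simp only [pvSet2, Int.toNat_natCast, pv_cast_flat]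
  have h0 : pvShape ((List.range h).map (fun _ => (List.range w).map (fun _ => (0:Int)))) h w := by
    exact pv_grid_shape h w (fun _ _ => 0)
  simpa [Function.comp_def] using
    pv_gridfill h w (fun y x => md.getD (y * w + x) 0) h
      ((List.range h).map (fun _ => (List.range w).map (fun _ => (0:Int)))) (le_refl h) h0

theorem a_clear_eq (m2d : List (List Int)) (w h : Nat) (hm : pvShape m2d h w) :
    a_clear m2d (w : Int) (h : Int)
      = (List.range h).map (fun _ => (List.range w).map (fun _ => (0:Int))) := by
  unfold a_clear
  rw [PySem.List.pyRange_zero_nat h, PySem.List.pyRange_zero_nat w]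
  simp only [List.foldl_map]
  simp only [pvSet2, Int.toNat_natCast]
  have hd : m2d.drop h = [] := List.drop_of_length_le (by rw [hm.1])
  simpa [hd] using pv_gridfill h w (fun _ _ => (0:Int)) h m2d (le_refl h) hm

-- the sides loop, pointwise
theorem a_sides_char (h w : Nat) (lx rx : Int)
    (hlx0 : 0 ≤ lx) (hlxw : lx < (w : Int)) (hrx0 : 0 ≤ rx) (hrxw : rx < (w : Int))
    (L : List Int) (hL : ∀ y ∈ L, 0 ≤ y ∧ y < (h : Int)) :
    ∀ (m : List (List Int)), pvShape m h w →
      pvShape (L.foldl (fun m y => pvSet2 (pvSet2 m y lx 1) y rx 1) m) h w ∧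
      ∀ y' x' : Int, 0 ≤ y' → 0 ≤ x' →
        pvGet2 (L.foldl (fun m y => pvSet2 (pvSet2 m y lx 1) y rx 1) m) y' x'
          = if y' ∈ L ∧ (x' = lx ∨ x' = rx) then 1 else pvGet2 m y' x' := by
  induction L with
  | nil => intro m hm; exact ⟨hm, by simp⟩
  | cons y0 t ih =>
    intro m hm
    have hy0 := hL y0 (by simp)
    have hma : pvShape (pvSet2 m y0 lx 1) h w := pvShape_set2 hm hy0.1 hy0.2 1
    have hmb : pvShape (pvSet2 (pvSet2 m y0 lx 1) y0 rx 1) h w := pvShape_set2 hma hy0.1 hy0.2 1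
    have hLt : ∀ y ∈ t, 0 ≤ y ∧ y < (h : Int) := fun y hy => hL y (by simp [hy])
    obtain ⟨ihs, ihv⟩ := ih hLt _ hmb
    refine ⟨by simpa using ihs, ?_⟩
    intro y' x' hy' hx'
    simp only [List.foldl_cons]
    rw [ihv y' x' hy' hx']
    rw [pvGet2_set2 hma hy0.1 hy0.2 hrx0 hrxw hy' hx' 1]
    rw [pvGet2_set2 hm hy0.1 hy0.2 hlx0 hlxw hy' hx' 1]
    by_cases h2 : y' ∈ t <;> by_cases h3 : y' = y0 <;> by_cases h4 : x' = rx <;>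
      by_cases h5 : x' = lx <;> simp [List.mem_cons, h2, h3, h4, h5]

-- the curves loop, pointwise
theorem a_curves_char (h w : Nat) (ty by_ : Int)
    (hty0 : 0 ≤ ty) (htyh : ty < (h : Int)) (hby0 : 0 ≤ by_) (hbyh : by_ < (h : Int))
    (L : List Int) (hL : ∀ x ∈ L, 0 ≤ x ∧ x < (w : Int)) :
    ∀ (m : List (List Int)), pvShape m h w →
      pvShape (L.foldl (fun m x => pvSet2 (pvSet2 m ty x 1) by_ x 1) m) h w ∧
      ∀ y' x' : Int, 0 ≤ y' → 0 ≤ x' →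
        pvGet2 (L.foldl (fun m x => pvSet2 (pvSet2 m ty x 1) by_ x 1) m) y' x'
          = if x' ∈ L ∧ (y' = ty ∨ y' = by_) then 1 else pvGet2 m y' x' := by
  induction L with
  | nil => intro m hm; exact ⟨hm, by simp⟩
  | cons x0 t ih =>
    intro m hm
    have hx0 := hL x0 (by simp)
    have hma : pvShape (pvSet2 m ty x0 1) h w := pvShape_set2 hm hty0 htyh 1
    have hmb : pvShape (pvSet2 (pvSet2 m ty x0 1) by_ x0 1) h w := pvShape_set2 hma hby0 hbyh 1
    have hLt : ∀ x ∈ t, 0 ≤ x ∧ x < (w : Int) := fun x hx => hL x (by simp [hx])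
    obtain ⟨ihs, ihv⟩ := ih hLt _ hmb
    refine ⟨by simpa using ihs, ?_⟩
    intro y' x' hy' hx'
    simp only [List.foldl_cons]
    rw [ihv y' x' hy' hx']
    rw [pvGet2_set2 hma hby0 hbyh hx0.1 hx0.2 hy' hx' 1]
    rw [pvGet2_set2 hm hty0 htyh hx0.1 hx0.2 hy' hx' 1]
    by_cases h2 : x' ∈ t <;> by_cases h3 : x' = x0 <;> by_cases h4 : y' = by_ <;>
      by_cases h5 : y' = ty <;> simp [List.mem_cons, h2, h3, h4, h5]

theorem pv_foldl_append_flatMap {α : Type} (L : List α) (g : α → List Int) (acc : List Int) :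
    L.foldl (fun acc y => acc ++ g y) acc = acc ++ L.flatMap g := by
  induction L generalizing acc with
  | nil => simp
  | cons a t ih => simp [ih, List.append_assoc]

theorem a_flatten_eq (m : List (List Int)) (w h : Nat) :
    a_flatten m (w : Int) (h : Int)
      = (List.range h).flatMap (fun (y : Nat) => (List.range w).map (fun (x : Nat) => pvGet2 m (y : Int) (x : Int))) := by
  unfold a_flatten
  rw [PySem.List.pyRange_zero_nat h, PySem.List.pyRange_zero_nat w]
  simp only [List.foldl_map]
  simp only [PySem.List.foldl_append_singleton_eq_map]
  rw [pv_foldl_append_flatMap (List.range h)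
    (fun (ky : Nat) => (List.range w).map (fun (kx : Nat) => pvGet2 m (ky : Int) (kx : Int))) []]
  rw [List.nil_append]

-- the bounds loop ---------------------------------------------------------

def pvLit (md : List Int) (h w : Nat) : List Nat :=
  (List.range (h * w)).filter (fun k => md.getD k 0 == 1)

theorem pvLit_lt (md : List Int) (h w : Nat) : ∀ i ∈ pvLit md h w, i < h * w := by
  intro i hi
  exact List.mem_range.1 (List.mem_of_mem_filter hi)

theorem pvLit_sorted (md : List Int) (h w : Nat) : (pvLit md h w).Pairwise (· < ·) :=
  List.Pairwise.filter _ List.pairwise_lt_range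

def pvUpd (b : Int × Int × Int × Int) (y x : Int) : Int × Int × Int × Int :=
  (min b.1 x, max b.2.1 x, min b.2.2.1 y, max b.2.2.2 y)

theorem a_bounds_eq (md : List Int) (m2d : List (List Int)) (w h : Nat) (hw : 0 < w)
    (hget : ∀ y x : Nat, y < h → x < w → pvGet2 m2d (y : Int) (x : Int) = md.getD (y * w + x) 0) :
    a_bounds m2d (w : Int) (h : Int)
      = (pvLit md h w).foldl
          (fun b i => pvUpd b ((i / w : Nat) : Int) ((i % w : Nat) : Int))
          ((w : Int), -1, (h : Int), -1) := by
  unfold a_bounds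
  rw [PySem.List.pyRange_zero_nat h, PySem.List.pyRange_zero_nat w]
  simp only [List.foldl_map]
  have step1 :
      (List.range h).foldl (fun b (ky : Nat) =>
        (List.range w).foldl (fun b (kx : Nat) =>
          if pvGet2 m2d (ky : Int) (kx : Int) = 1 then
            (min b.1 (kx : Int), max b.2.1 (kx : Int), min b.2.2.1 (ky : Int), max b.2.2.2 (ky : Int))
          else b) b) ((w : Int), -1, (h : Int), -1)
      = (List.range h).foldl (fun b (ky : Nat) =>
        (List.range w).foldl (fun b (kx : Nat) =>
          if md.getD (ky * w + kx) 0 = 1 then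
            pvUpd b (ky : Int) (kx : Int)
          else b) b) ((w : Int), -1, (h : Int), -1) := by
    apply PySem.List.foldl_congr_mem
    intro acc ky hky
    apply PySem.List.foldl_congr_mem
    intro acc' kx hkx
    rw [hget ky kx (List.mem_range.1 hky) (List.mem_range.1 hkx)]
    rfl
  rw [step1]
  rw [pv_nested_eq_flat w hw (fun i => md.getD i 0 = 1)
      (fun b y x => pvUpd b (y : Int) (x : Int)) h ((w : Int), -1, (h : Int), -1)]
  rw [PySem.List.foldl_ite_eq_foldl_filter]
  rfl

-- the four components of the bounds fold over a sorted non-empty hit list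
theorem pv_bounds_components (w h : Nat) (hw : 0 < w) (j : Nat) (t : List Nat)
    (hpw : (j :: t).Pairwise (· < ·)) (hbound : ∀ i ∈ j :: t, i < h * w) :
    (j :: t).foldl (fun b i => pvUpd b ((i / w : Nat) : Int) ((i % w : Nat) : Int))
        ((w : Int), -1, (h : Int), -1)
      = ((t.map (fun i => ((i % w : Nat) : Int))).foldl min ((j % w : Nat) : Int),
         (t.map (fun i => ((i % w : Nat) : Int))).foldl max ((j % w : Nat) : Int),
         ((j / w : Nat) : Int),
         (((j :: t).getLast (by simp) / w : Nat) : Int)) := by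
  have hsplit : ∀ (L : List Nat) (a b c d : Int),
      L.foldl (fun b i => pvUpd b ((i / w : Nat) : Int) ((i % w : Nat) : Int)) (a, b, c, d)
        = ((L.map (fun i => ((i % w : Nat) : Int))).foldl min a,
           (L.map (fun i => ((i % w : Nat) : Int))).foldl max b,
           (L.map (fun i => ((i / w : Nat) : Int))).foldl min c,
           (L.map (fun i => ((i / w : Nat) : Int))).foldl max d) := by
    intro L a b c d
    induction L generalizing a b c d with
    | nil => rfl
    | cons i L ih =>
      simp only [List.foldl_cons, List.map_cons, pvUpd]
      exact ih _ _ _ _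
  have h1 : j % w < w := Nat.mod_lt _ hw
  have h2 : j / w < h := (Nat.div_lt_iff_lt_mul hw).2 (hbound j (by simp))
  have e1 : min ((w : Nat) : Int) ((j % w : Nat) : Int) = ((j % w : Nat) : Int) :=
    min_eq_right (by exact_mod_cast Nat.le_of_lt h1)
  have e2 : max (-1 : Int) ((j % w : Nat) : Int) = ((j % w : Nat) : Int) :=
    max_eq_right (le_trans (by norm_num) (Int.natCast_nonneg _))
  have e3 : min ((h : Nat) : Int) ((j / w : Nat) : Int) = ((j / w : Nat) : Int) :=
    min_eq_right (by exact_mod_cast Nat.le_of_lt h2)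
  have e4 : max (-1 : Int) ((j / w : Nat) : Int) = ((j / w : Nat) : Int) :=
    max_eq_right (le_trans (by norm_num) (Int.natCast_nonneg _))
  rw [show (j :: t).foldl (fun b i => pvUpd b ((i / w : Nat) : Int) ((i % w : Nat) : Int))
        ((w : Int), -1, (h : Int), -1)
      = t.foldl (fun b i => pvUpd b ((i / w : Nat) : Int) ((i % w : Nat) : Int))
        (min ((w : Nat) : Int) ((j % w : Nat) : Int),
         max (-1 : Int) ((j % w : Nat) : Int),
         min ((h : Nat) : Int) ((j / w : Nat) : Int),
         max (-1 : Int) ((j / w : Nat) : Int)) from rfl]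
  rw [e1, e2, e3, e4, hsplit]
  have hjt : ∀ i ∈ t, j < i := (List.pairwise_cons.1 hpw).1
  have c3 : (t.map (fun i => ((i / w : Nat) : Int))).foldl min ((j / w : Nat) : Int)
      = ((j / w : Nat) : Int) := by
    apply pv_foldl_min_eq
    · exact le_refl _
    · intro a ha
      obtain ⟨i, hi, rfl⟩ := List.mem_map.1 ha
      exact_mod_cast Nat.div_le_div_right (le_of_lt (hjt i hi))
    · exact Or.inl rfl
  have c4 : (t.map (fun i => ((i / w : Nat) : Int))).foldl max ((j / w : Nat) : Int)
      = (((j :: t).getLast (by simp) / w : Nat) : Int) := by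
    apply pv_foldl_max_eq
    · exact_mod_cast Nat.div_le_div_right (pv_pairwise_le_getLast _ hpw (by simp) j (by simp))
    · intro a ha
      obtain ⟨i, hi, rfl⟩ := List.mem_map.1 ha
      exact_mod_cast Nat.div_le_div_right (pv_pairwise_le_getLast _ hpw (by simp) i (by simp [hi]))
    · rcases List.eq_nil_or_concat' t with rfl | ⟨t', z, rfl⟩
      · simp
      · right
        have hlast : (j :: (t' ++ [z])).getLast (by simp) = z := by simp [List.getLast_cons]
        rw [hlast]
        exact List.mem_map.2 ⟨z, by simp, rfl⟩
  rw [c3, c4]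

-- B-side characterization -------------------------------------------------

theorem pv_getLast_map (l : List Nat) (hne : l ≠ []) :
    (l.map (fun (k : Nat) => (k : Int))).getLast (fun hmap => hne (List.map_eq_nil_iff.1 hmap)) = ((l.getLast hne : Nat) : Int) := by
  have e1 := List.getLast?_map (f := fun (k : Nat) => (k : Int)) (l := l)
  rw [List.getLast?_eq_some_getLast (fun hmap => hne (List.map_eq_nil_iff.1 hmap)),
      List.getLast?_eq_some_getLast hne] at e1
  simp only [Option.map_some, Option.some.injEq] at e1
  exact e1

theorem b_lit_eq (md : List Int) (w h : Nat) :
    (PySem.List.pyRange 0 ((w : Int) * (h : Int)) 1).filter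
        (fun i => PySem.List.pyGetD md i 0 == 1)
      = (pvLit md h w).map (fun (k : Nat) => (k : Int)) := by
  rw [show ((w : Int) * (h : Int)) = ((w * h : Nat) : Int) by push_cast; ring]
  rw [PySem.List.pyRange_zero_nat]
  rw [List.filter_map]
  unfold pvLit
  rw [Nat.mul_comm h w]
  refine congrArg (List.map (fun (k : Nat) => (k : Int))) ?_
  apply List.filter_congr
  intro k _
  simp

theorem b_pos_eq (md : List Int) (w h : Nat) (hw : 0 < w) (hh : 0 < h)
    (j : Nat) (t : List Nat) (hlit : pvLit md h w = j :: t) :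
    enhance_0_character_alt md (w : Int) (h : Int)
      = (List.range h).flatMap (fun (y : Nat) => (List.range w).map (fun (x : Nat) =>
          b_pix ((j / w : Nat) : Int) (((j :: t).getLast (by simp) / w : Nat) : Int)
            ((t.map (fun i => ((i % w : Nat) : Int))).foldl min ((j % w : Nat) : Int))
            ((t.map (fun i => ((i % w : Nat) : Int))).foldl max ((j % w : Nat) : Int))
            (w : Int) (h : Int) (y : Int) (x : Int))) := by
  rw [show enhance_0_character_alt md (w : Int) (h : Int)
      = (let lit := (PySem.List.pyRange 0 ((w : Int) * (h : Int)) 1).filter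
            (fun i => PySem.List.pyGetD md i 0 == 1)
         if lit.isEmpty then md
         else
           let top := PySem.Int.floordiv (PySem.List.pyGetD lit 0 0) (w : Int)
           let bottom := PySem.Int.floordiv (PySem.List.pyGetD lit (-1) 0) (w : Int)
           let cols := lit.map (fun i => PySem.Int.mod i (w : Int))
           let left := (PySem.List.min? cols (fun v => v)).getD 0
           let right := (PySem.List.max? cols (fun v => v)).getD 0
           (PySem.List.pyRange 0 ((w : Int) * (h : Int)) 1).map (fun i =>
             b_pix top bottom left right (w : Int) (h : Int)
               (PySem.Int.floordiv i (w : Int)) (PySem.Int.mod i (w : Int)))) by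
    unfold enhance_0_character_alt
    rw [if_neg (by omega : ¬((w : Int) ≤ 0 ∨ (h : Int) ≤ 0))]]
  simp only []
  rw [b_lit_eq md w h, hlit]
  rw [List.map_cons]
  rw [if_neg (by simp)]
  rw [PySem.List.pyGetD_zero_cons]
  rw [show PySem.List.pyGetD ((j : Int) :: t.map (fun (k : Nat) => (k : Int))) (-1) 0
      = (((j :: t).getLast (by simp) : Nat) : Int) by
    have e := PySem.List.pyGetD_neg_one ((j : Int) :: t.map (fun (k : Nat) => (k : Int))) 0 (by simp)
    rw [e]
    exact pv_getLast_map (j :: t) (by simp)]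
  rw [PySem.Int.floordiv_natCast, PySem.Int.floordiv_natCast]
  rw [List.map_cons, List.map_map]
  rw [PySem.Int.mod_natCast]
  rw [show (t.map ((fun i => PySem.Int.mod i (w : Int)) ∘ (fun (k : Nat) => (k : Int))))
      = t.map (fun i => ((i % w : Nat) : Int)) by
    apply List.map_congr_left; intro i _
    simp]
  rw [PySem.List.min?_id_cons, PySem.List.max?_id_cons]
  simp only [Option.getD_some]
  rw [show ((w : Int) * (h : Int)) = ((h * w : Nat) : Int) by push_cast; ring]
  rw [PySem.List.pyRange_zero_nat, List.map_map]
  rw [← pv_flat_of_nested_map w hw _ h]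
  apply List.map_congr_left
  intro k _
  simp only [Function.comp_def, PySem.Int.floordiv_natCast, PySem.Int.mod_natCast]

-- one guarded corner fix-up, pointwise
theorem pv_corner_step {h w : Nat} {m : List (List Int)} (hm : pvShape m h w)
    (c : Prop) [Decidable c] {y1 x1 y2 x2 : Int}
    (hr : c → (0 ≤ y1 ∧ y1 < (h : Int) ∧ 0 ≤ x1 ∧ x1 < (w : Int) ∧
               0 ≤ y2 ∧ y2 < (h : Int) ∧ 0 ≤ x2 ∧ x2 < (w : Int))) :
    pvShape (if c then pvSet2 (pvSet2 m y1 x1 1) y2 x2 0 else m) h w ∧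
    ∀ y x : Int, 0 ≤ y → 0 ≤ x →
      pvGet2 (if c then pvSet2 (pvSet2 m y1 x1 1) y2 x2 0 else m) y x
        = if c ∧ y = y2 ∧ x = x2 then 0
          else if c ∧ y = y1 ∧ x = x1 then 1
          else pvGet2 m y x := by
  by_cases hc : c
  · obtain ⟨a1, a2, a3, a4, a5, a6, a7, a8⟩ := hr hc
    have hma : pvShape (pvSet2 m y1 x1 1) h w := pvShape_set2 hm a1 a2 1
    refine ⟨by rw [if_pos hc]; exact pvShape_set2 hma a5 a6 0, ?_⟩
    intro y x hy hx
    rw [if_pos hc]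
    rw [pvGet2_set2 hma a5 a6 a7 a8 hy hx 0]
    rw [pvGet2_set2 hm a1 a2 a3 a4 hy hx 1]
    simp [hc]
  · refine ⟨by rwa [if_neg hc], ?_⟩
    intro y x hy hx
    simp [hc]

-- A and B agree pixel by pixel on the main branch
set_option maxHeartbeats 2000000 in
theorem pv_core (h w : Nat) (m1 : List (List Int)) (hm1 : pvShape m1 h w)
    (hz : ∀ y x : Nat, y < h → x < w → pvGet2 m1 (y : Int) (x : Int) = 0)
    (ty by_ lx rx : Int)
    (hT0 : 0 ≤ ty) (hTB : ty ≤ by_) (hBh : by_ < (h : Int))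
    (hL0 : 0 ≤ lx) (hLR : lx ≤ rx) (hRw : rx < (w : Int))
    (y x : Nat) (hy : y < h) (hx : x < w) :
    pvGet2 (a_corners (((PySem.List.pyRange (lx + 1) rx 1).foldl (fun m x => pvSet2 (pvSet2 m ty x 1) by_ x 1) ((PySem.List.pyRange (ty + 1) by_ 1).foldl (fun m y => pvSet2 (pvSet2 m y lx 1) y rx 1) m1))) ty by_ lx rx
        (w : Int) (h : Int)) (y : Int) (x : Int)
      = b_pix ty by_ lx rx (w : Int) (h : Int) (y : Int) (x : Int) := by
  have hy0 : (0 : Int) ≤ (y : Int) := Int.natCast_nonneg _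
  have hx0 : (0 : Int) ≤ (x : Int) := Int.natCast_nonneg _
  obtain ⟨hm2, v2⟩ := a_sides_char h w lx rx hL0 (by omega) (by omega) hRw
    (PySem.List.pyRange (ty + 1) by_ 1)
    (fun yy hyy => by rw [PySem.List.mem_pyRange_one] at hyy; omega) m1 hm1
  obtain ⟨hm3, v3⟩ := a_curves_char h w ty by_ hT0 (by omega) (by omega) hBh
    (PySem.List.pyRange (lx + 1) rx 1)
    (fun xx hxx => by rw [PySem.List.mem_pyRange_one] at hxx; omega)
    ((PySem.List.pyRange (ty + 1) by_ 1).foldl (fun m y => pvSet2 (pvSet2 m y lx 1) y rx 1) m1) hm2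
  obtain ⟨hm4, v4⟩ := pv_corner_step hm3 (ty + 1 < (h : Int) ∧ lx + 1 < (w : Int))
    (y1 := ty + 1) (x1 := lx + 1) (y2 := ty) (x2 := lx)
    (fun hc => by refine ⟨by omega, by omega, by omega, by omega, by omega, by omega, by omega, by omega⟩)
  obtain ⟨hm5, v5⟩ := pv_corner_step hm4 (ty + 1 < (h : Int) ∧ rx - 1 ≥ 0)
    (y1 := ty + 1) (x1 := rx - 1) (y2 := ty) (x2 := rx)
    (fun hc => by refine ⟨by omega, by omega, by omega, by omega, by omega, by omega, by omega, by omega⟩)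
  obtain ⟨hm6, v6⟩ := pv_corner_step hm5 (by_ - 1 ≥ 0 ∧ lx + 1 < (w : Int))
    (y1 := by_ - 1) (x1 := lx + 1) (y2 := by_) (x2 := lx)
    (fun hc => by refine ⟨by omega, by omega, by omega, by omega, by omega, by omega, by omega, by omega⟩)
  obtain ⟨hm7, v7⟩ := pv_corner_step hm6 (by_ - 1 ≥ 0 ∧ rx - 1 ≥ 0)
    (y1 := by_ - 1) (x1 := rx - 1) (y2 := by_) (x2 := rx)
    (fun hc => by refine ⟨by omega, by omega, by omega, by omega, by omega, by omega, by omega, by omega⟩)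
  rw [show a_corners (((PySem.List.pyRange (lx + 1) rx 1).foldl (fun m x => pvSet2 (pvSet2 m ty x 1) by_ x 1) ((PySem.List.pyRange (ty + 1) by_ 1).foldl (fun m y => pvSet2 (pvSet2 m y lx 1) y rx 1) m1))) ty by_ lx rx
        (w : Int) (h : Int)
      = (if by_ - 1 ≥ 0 ∧ rx - 1 ≥ 0 then
          pvSet2 (pvSet2 (if by_ - 1 ≥ 0 ∧ lx + 1 < (w : Int) then
            pvSet2 (pvSet2 (if ty + 1 < (h : Int) ∧ rx - 1 ≥ 0 then
              pvSet2 (pvSet2 (if ty + 1 < (h : Int) ∧ lx + 1 < (w : Int) then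
                pvSet2 (pvSet2 (((PySem.List.pyRange (lx + 1) rx 1).foldl (fun m x => pvSet2 (pvSet2 m ty x 1) by_ x 1) ((PySem.List.pyRange (ty + 1) by_ 1).foldl (fun m y => pvSet2 (pvSet2 m y lx 1) y rx 1) m1)))
                  (ty + 1) (lx + 1) 1) ty lx 0
              else ((PySem.List.pyRange (lx + 1) rx 1).foldl (fun m x => pvSet2 (pvSet2 m ty x 1) by_ x 1) ((PySem.List.pyRange (ty + 1) by_ 1).foldl (fun m y => pvSet2 (pvSet2 m y lx 1) y rx 1) m1)))
              (ty + 1) (rx - 1) 1) ty rx 0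
            else (if ty + 1 < (h : Int) ∧ lx + 1 < (w : Int) then
              pvSet2 (pvSet2 (((PySem.List.pyRange (lx + 1) rx 1).foldl (fun m x => pvSet2 (pvSet2 m ty x 1) by_ x 1) ((PySem.List.pyRange (ty + 1) by_ 1).foldl (fun m y => pvSet2 (pvSet2 m y lx 1) y rx 1) m1)))
                (ty + 1) (lx + 1) 1) ty lx 0
            else ((PySem.List.pyRange (lx + 1) rx 1).foldl (fun m x => pvSet2 (pvSet2 m ty x 1) by_ x 1) ((PySem.List.pyRange (ty + 1) by_ 1).foldl (fun m y => pvSet2 (pvSet2 m y lx 1) y rx 1) m1))))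
            (by_ - 1) (lx + 1) 1) by_ lx 0
          else (if ty + 1 < (h : Int) ∧ rx - 1 ≥ 0 then
            pvSet2 (pvSet2 (if ty + 1 < (h : Int) ∧ lx + 1 < (w : Int) then
              pvSet2 (pvSet2 (((PySem.List.pyRange (lx + 1) rx 1).foldl (fun m x => pvSet2 (pvSet2 m ty x 1) by_ x 1) ((PySem.List.pyRange (ty + 1) by_ 1).foldl (fun m y => pvSet2 (pvSet2 m y lx 1) y rx 1) m1)))
                (ty + 1) (lx + 1) 1) ty lx 0
            else ((PySem.List.pyRange (lx + 1) rx 1).foldl (fun m x => pvSet2 (pvSet2 m ty x 1) by_ x 1) ((PySem.List.pyRange (ty + 1) by_ 1).foldl (fun m y => pvSet2 (pvSet2 m y lx 1) y rx 1) m1)))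
            (ty + 1) (rx - 1) 1) ty rx 0
          else (if ty + 1 < (h : Int) ∧ lx + 1 < (w : Int) then
            pvSet2 (pvSet2 (((PySem.List.pyRange (lx + 1) rx 1).foldl (fun m x => pvSet2 (pvSet2 m ty x 1) by_ x 1) ((PySem.List.pyRange (ty + 1) by_ 1).foldl (fun m y => pvSet2 (pvSet2 m y lx 1) y rx 1) m1)))
              (ty + 1) (lx + 1) 1) ty lx 0
          else ((PySem.List.pyRange (lx + 1) rx 1).foldl (fun m x => pvSet2 (pvSet2 m ty x 1) by_ x 1) ((PySem.List.pyRange (ty + 1) by_ 1).foldl (fun m y => pvSet2 (pvSet2 m y lx 1) y rx 1) m1)))))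
        (by_ - 1) (rx - 1) 1) by_ rx 0
        else _) from rfl]
  rw [v7 _ _ hy0 hx0, v6 _ _ hy0 hx0, v5 _ _ hy0 hx0, v4 _ _ hy0 hx0,
      v3 _ _ hy0 hx0, v2 _ _ hy0 hx0, hz y x hy hx]
  simp only [PySem.List.mem_pyRange_one]
  unfold b_pix
  split_ifs <;> omega

theorem a_degenerate (md : List Int) (width height : Int)
    (hd : width ≤ 0 ∨ height ≤ 0) (hnn : 0 ≤ width ∨ 0 ≤ height) :
    enhance_0_character md width height = md := by
  by_cases hh : height ≤ 0
  · have e1 : PySem.List.pyRange 0 height 1 = [] := PySem.List.pyRange_one_eq_nil (by omega)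
    simp only [enhance_0_character, a_bounds, e1, List.foldl_nil]
    rw [if_pos (by omega)]
  · have e2 : PySem.List.pyRange 0 width 1 = [] := PySem.List.pyRange_one_eq_nil (by omega)
    simp only [enhance_0_character, a_bounds, e2, List.foldl_nil]
    rw [pv_foldl_const]
    rw [if_pos (Or.inr (show (height : Int) > -1 by omega))]

theorem b_empty_eq (md : List Int) (w h : Nat) (hw : 0 < w) (hh : 0 < h)
    (hlit : pvLit md h w = []) : enhance_0_character_alt md (w : Int) (h : Int) = md := by
  rw [show enhance_0_character_alt md (w : Int) (h : Int)
      = (let lit := (PySem.List.pyRange 0 ((w : Int) * (h : Int)) 1).filter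
            (fun i => PySem.List.pyGetD md i 0 == 1)
         if lit.isEmpty then md
         else
           let top := PySem.Int.floordiv (PySem.List.pyGetD lit 0 0) (w : Int)
           let bottom := PySem.Int.floordiv (PySem.List.pyGetD lit (-1) 0) (w : Int)
           let cols := lit.map (fun i => PySem.Int.mod i (w : Int))
           let left := (PySem.List.min? cols (fun v => v)).getD 0
           let right := (PySem.List.max? cols (fun v => v)).getD 0
           (PySem.List.pyRange 0 ((w : Int) * (h : Int)) 1).map (fun i =>
             b_pix top bottom left right (w : Int) (h : Int)
               (PySem.Int.floordiv i (w : Int)) (PySem.Int.mod i (w : Int)))) by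
    unfold enhance_0_character_alt
    rw [if_neg (by omega : ¬((w : Int) ≤ 0 ∨ (h : Int) ≤ 0))]]
  simp only []
  rw [b_lit_eq md w h, hlit]
  simp

-- ===== VERDICT (by name: the statement is the Claim_ definition above) =====
theorem enhance_0_character_spec : Claim_unchanged_enhance_0_character := by
  unfold Claim_unchanged_enhance_0_character
  intro md width height hDom hPre
  unfold Spec_enhance_0_character
  intro hnD
  by_cases hpos : 0 < width ∧ 0 < height
  · obtain ⟨hw0, hh0⟩ := hpos
    obtain ⟨w, rfl⟩ : ∃ w : Nat, width = (w : Int) :=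
      ⟨width.toNat, (Int.toNat_of_nonneg (le_of_lt hw0)).symm⟩
    obtain ⟨h, rfl⟩ : ∃ h : Nat, height = (h : Int) :=
      ⟨height.toNat, (Int.toNat_of_nonneg (le_of_lt hh0)).symm⟩
    have hw : 0 < w := by exact_mod_cast hw0
    have hh : 0 < h := by exact_mod_cast hh0
    have hfillget : ∀ y x : Nat, y < h → x < w →
        pvGet2 (a_fill md (w : Int) (h : Int)) (y : Int) (x : Int) = md.getD (y * w + x) 0 := by
      intro y x hy hx
      rw [a_fill_eq]
      exact pv_grid_get h w _ y x hy hx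
    have hboundsA := a_bounds_eq md (a_fill md (w : Int) (h : Int)) w h hw hfillget
    rcases hcase : pvLit md h w with _ | ⟨j, t⟩
    · rw [hcase, List.foldl_nil] at hboundsA
      rw [b_empty_eq md w h hw hh hcase]
      simp only [enhance_0_character]
      rw [hboundsA]
      rw [if_pos (Or.inl (show ((w : Nat) : Int) > -1 by omega))]
    · rw [hcase] at hboundsA
      rw [pv_bounds_components w h hw j t (hcase ▸ pvLit_sorted md h w)
        (hcase ▸ pvLit_lt md h w)] at hboundsA
      have hjmem : j < h * w := by
        have := pvLit_lt md h w
        rw [hcase] at this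
        exact this j (by simp)
      have hglmem : (j :: t).getLast (by simp) < h * w := by
        have := pvLit_lt md h w
        rw [hcase] at this
        exact this _ (List.getLast_mem _)
      have hjle : j ≤ (j :: t).getLast (by simp) :=
        pv_pairwise_le_getLast _ (hcase ▸ pvLit_sorted md h w) (by simp) j (by simp)
      have hT0 : (0 : Int) ≤ ((j / w : Nat) : Int) := Int.natCast_nonneg _
      have hTB : ((j / w : Nat) : Int) ≤ (((j :: t).getLast (by simp) / w : Nat) : Int) := by
        exact_mod_cast Nat.div_le_div_right hjle
      have hBh : (((j :: t).getLast (by simp) / w : Nat) : Int) < (h : Int) := by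
        exact_mod_cast (Nat.div_lt_iff_lt_mul hw).2 hglmem
      have hL0 : (0 : Int) ≤ (t.map (fun i => ((i % w : Nat) : Int))).foldl min ((j % w : Nat) : Int) := by
        apply pv_le_foldl_min
        · exact Int.natCast_nonneg _
        · intro a ha
          obtain ⟨i, _, rfl⟩ := List.mem_map.1 ha
          exact Int.natCast_nonneg _
      have hLR : (t.map (fun i => ((i % w : Nat) : Int))).foldl min ((j % w : Nat) : Int)
          ≤ (t.map (fun i => ((i % w : Nat) : Int))).foldl max ((j % w : Nat) : Int) :=
        le_trans (PySem.List.foldl_min_le _ _).1 (PySem.List.le_foldl_max _ _).1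
      have hRw : (t.map (fun i => ((i % w : Nat) : Int))).foldl max ((j % w : Nat) : Int) < (w : Int) := by
        have hb := pv_foldl_max_le (t.map (fun i => ((i % w : Nat) : Int))) ((j % w : Nat) : Int)
          ((w : Int) - 1)
          (by have := Nat.mod_lt j hw; omega)
          (by intro a ha
              obtain ⟨i, _, rfl⟩ := List.mem_map.1 ha
              have := Nat.mod_lt i hw; omega)
        omega
      have hm1 : pvShape (a_clear (a_fill md (w : Int) (h : Int)) (w : Int) (h : Int)) h w := by
        rw [a_clear_eq _ _ _ (by rw [a_fill_eq]; exact pv_grid_shape h w _)]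
        exact pv_grid_shape h w _
      have hz : ∀ y x : Nat, y < h → x < w →
          pvGet2 (a_clear (a_fill md (w : Int) (h : Int)) (w : Int) (h : Int)) (y : Int) (x : Int) = 0 := by
        intro y x hy hx
        rw [a_clear_eq _ _ _ (by rw [a_fill_eq]; exact pv_grid_shape h w _)]
        exact pv_grid_get h w (fun _ _ => 0) y x hy hx
      rw [b_pos_eq md w h hw hh j t hcase]
      simp only [enhance_0_character]
      rw [hboundsA]
      rw [if_neg (by
        rw [not_or]
        exact ⟨not_lt.2 hLR, not_lt.2 hTB⟩)]
      rw [a_flatten_eq]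
      rw [List.flatMap_def, List.flatMap_def]
      apply congrArg List.flatten
      apply List.map_congr_left
      intro y hy
      apply List.map_congr_left
      intro x hx
      exact pv_core h w _ hm1 hz _ _ _ _ hT0 hTB hBh hL0 hLR hRw y x
        (List.mem_range.1 hy) (List.mem_range.1 hx)
  · have hBmd : enhance_0_character_alt md width height = md := by
      unfold enhance_0_character_alt
      rw [if_pos (by omega)]
    rw [hBmd]
    by_cases hneg : width < 0 ∧ height < 0
    · have hmd : md = [] := by
        by_contra hne
        exact hnD ⟨hne, hneg.1, hneg.2⟩
      obtain ⟨hp1, hp2⟩ := hPre.2 hneg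
      rw [a_negneg md width height hneg.1 hp1 hneg.2 hp2, hmd]
    · exact a_degenerate md width height (by omega) (by omega)

theorem enhance_0_character_changed : Claim_changed_enhance_0_character := by
  unfold Claim_changed_enhance_0_character; decide

theorem enhance_0_character_tight : Claim_exact_enhance_0_character := by
  unfold Claim_exact_enhance_0_character
  intro md w h _ hPre hD
  rw [a_negneg md w h hD.2.1 (hPre.2 ⟨hD.2.1, hD.2.2⟩).1 hD.2.2 (hPre.2 ⟨hD.2.1, hD.2.2⟩).2]
  unfold enhance_0_character_alt
  rw [if_pos (Or.inl (le_of_lt hD.2.1))]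
  exact fun e => hD.1 e.symm
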